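-- pv_equiv track=rewrite | github.com/aishanee-sinha/Multi-Agent-Autonomous-Workforce-Assistant | AWSOrchestration/Meeting_Summarizer/ms_agent_call.py | clean_structured_summary
-- ===== SOURCE A (Python) =====
-- def clean_structured_summary(raw: str) -> str:
--     headers  = ["ABSTRACT:", "DECISIONS:", "ACTIONS:", "PROBLEMS:"]
--     earliest = len(raw)
--     for h in headers:
--         pos = raw.upper().find(h)
--         if pos != -1 and pos < earliest:
--             earliest = pos
--     return raw[earliest:].strip() if earliest < len(raw) else raw.strip()
-- ===== SOURCE B (Python) =====
-- def clean_structured_summary(raw: str) -> str: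
--     headers = ("ABSTRACT:", "DECISIONS:", "ACTIONS:", "PROBLEMS:")
--     u = raw.upper()
--     for i in range(len(u)):
--         if u.startswith(headers, i):
--             return raw[i:].strip()
--     return raw.strip()
-- ===== Notes on version B (the rewrite author's own statement) =====
-- stated objective: alternative
-- what changed: Replaces the header-major pass (four separate find scans whose minimum is kept) by a single position-major left-to-right scan that stops at the first index where any header starts.
import Mathlib
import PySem

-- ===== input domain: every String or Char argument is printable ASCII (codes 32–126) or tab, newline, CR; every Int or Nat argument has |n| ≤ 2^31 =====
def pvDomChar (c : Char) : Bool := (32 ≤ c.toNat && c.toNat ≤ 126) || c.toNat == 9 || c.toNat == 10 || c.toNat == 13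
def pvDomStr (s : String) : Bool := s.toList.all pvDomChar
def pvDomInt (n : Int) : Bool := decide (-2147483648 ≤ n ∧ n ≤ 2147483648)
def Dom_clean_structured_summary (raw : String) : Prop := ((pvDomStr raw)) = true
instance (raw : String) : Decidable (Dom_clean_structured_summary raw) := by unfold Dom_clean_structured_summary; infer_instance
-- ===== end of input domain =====

-- B replaces A's header-major pass (four find scans, keep the minimum) by one
-- position-major scan that stops at the first index where any header starts (objective: alternative).

-- ===== PORT A =====
def pvHeaders : List (List Char) :=
  ["ABSTRACT:".toList, "DECISIONS:".toList, "ACTIONS:".toList, "PROBLEMS:".toList]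

def clean_structured_summary (raw : String) : String :=
  let s := raw.toList
  let earliest := pvHeaders.foldl
    (fun e h =>
      let pos := PySem.Chars.find (PySem.Chars.upper s) h
      if pos ≠ -1 ∧ pos < e then pos else e)
    ((s.length : Int))
  if earliest < (s.length : Int) then
    String.ofList (PySem.Chars.strip (PySem.List.slice s (some earliest) none))
  else
    String.ofList (PySem.Chars.strip s)

-- ===== PORT B =====
-- u.startswith(headers, i): does any header start at the current position?
def pvStartsWithAnyHeader (v : List Char) : Bool :=
  pvHeaders.any (fun h => PySem.Chars.startswith v h)

-- the 'for i in range(len(u))' loop with its early return, as recursion on the suffix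
def pvScan : List Char → Nat → Option Nat
  | [], _ => none
  | c :: rest, i =>
    if pvStartsWithAnyHeader (c :: rest) then some i else pvScan rest (i + 1)

def clean_structured_summary_alt (raw : String) : String :=
  let u := PySem.Chars.upper raw.toList
  match pvScan u 0 with
  | some i => String.ofList (PySem.Chars.strip (raw.toList.drop i))
  | none   => String.ofList (PySem.Chars.strip raw.toList)

-- ===== PRECONDITION & SPEC =====
def Spec_clean_structured_summary (raw : String) (out : String) : Prop := out = clean_structured_summary_alt raw
instance (raw : String) (out : String) : Decidable (Spec_clean_structured_summary raw out) := by unfold Spec_clean_structured_summary; infer_instance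

-- ===== CLAIM (what is proved, stated in full; the proofs are below) =====
def Claim_equal_clean_structured_summary : Prop := ∀ (raw : String), Dom_clean_structured_summary raw → Spec_clean_structured_summary raw (clean_structured_summary raw)

-- ===== LEMMAS AND PROOFS =====

theorem pvHeaders_ne_nil : ∀ h ∈ pvHeaders, h ≠ [] := by decide

theorem pvStartsWithAnyHeader_nil : pvStartsWithAnyHeader [] = false := by decide

theorem pvStartsWithAnyHeader_iff (v : List Char) :
    pvStartsWithAnyHeader v = true ↔ ∃ h ∈ pvHeaders, h <+: v := by
  simp [pvStartsWithAnyHeader, List.any_eq_true, PySem.Chars.startswith_iff]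

theorem pvScan_none (v : List Char) :
    ∀ i, pvScan v i = none → ∀ k, pvStartsWithAnyHeader (v.drop k) = false := by
  induction v with
  | nil => intro i _ k; simp [pvStartsWithAnyHeader_nil]
  | cons c rest ih =>
    intro i h k
    by_cases hM : pvStartsWithAnyHeader (c :: rest) = true
    · simp [pvScan, hM] at h
    · cases k with
      | zero => simpa using eq_false_of_ne_true hM
      | succ k =>
        simp [pvScan, hM] at h
        exact ih (i + 1) h k

theorem pvScan_some (v : List Char) :
    ∀ i j, pvScan v i = some j →
      i ≤ j ∧ pvStartsWithAnyHeader (v.drop (j - i)) = true ∧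
        ∀ k < j - i, pvStartsWithAnyHeader (v.drop k) = false := by
  induction v with
  | nil => intro i j h; simp [pvScan] at h
  | cons c rest ih =>
    intro i j h
    by_cases hM : pvStartsWithAnyHeader (c :: rest) = true
    · simp [pvScan, hM] at h
      subst h
      refine ⟨le_rfl, by simpa using hM, ?_⟩
      intro k hk; omega
    · simp [pvScan, hM] at h
      obtain ⟨h1, h2, h3⟩ := ih (i + 1) j h
      have hd : j - i = (j - (i + 1)) + 1 := by omega
      refine ⟨by omega, ?_, ?_⟩
      · rw [hd]; simpa using h2
      · intro k hk
        cases k with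
        | zero => simpa using eq_false_of_ne_true hM
        | succ k =>
          have : k < j - (i + 1) := by omega
          simpa using h3 k this

theorem pvFold_inv (u : List Char) :
    ∀ (l : List (List Char)) (e0 : Int),
      let r := l.foldl
        (fun e h =>
          let pos := PySem.Chars.find u h
          if pos ≠ -1 ∧ pos < e then pos else e) e0
      r ≤ e0 ∧ (∀ h ∈ l, PySem.Chars.find u h ≠ -1 → r ≤ PySem.Chars.find u h) ∧
        (r = e0 ∨ ∃ h ∈ l, r = PySem.Chars.find u h ∧ PySem.Chars.find u h ≠ -1) := by
  intro l
  induction l with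
  | nil => intro e0; simp
  | cons h0 t ih =>
    intro e0
    simp only [List.foldl_cons]
    set e1 := if PySem.Chars.find u h0 ≠ -1 ∧ PySem.Chars.find u h0 < e0 then PySem.Chars.find u h0 else e0 with he1
    obtain ⟨r1, r2, r3⟩ := ih e1
    have he1le : e1 ≤ e0 := by
      rw [he1]; split_ifs with hc
      · exact le_of_lt hc.2
      · exact le_rfl
    have he1h0 : PySem.Chars.find u h0 ≠ -1 → e1 ≤ PySem.Chars.find u h0 := by
      intro hne
      rw [he1]; split_ifs with hc
      · exact le_rfl
      · rw [not_and, not_lt] at hc; exact hc hne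
    refine ⟨le_trans r1 he1le, ?_, ?_⟩
    · intro h hh hne
      rcases List.mem_cons.mp hh with rfl | hh
      · exact le_trans r1 (he1h0 hne)
      · exact r2 h hh hne
    · rcases r3 with hr | ⟨h, hh, hr⟩
      · by_cases hc : PySem.Chars.find u h0 ≠ -1 ∧ PySem.Chars.find u h0 < e0
        · exact Or.inr ⟨h0, List.mem_cons_self, by rw [hr, he1, if_pos hc], hc.1⟩
        · exact Or.inl (by rw [hr, he1, if_neg hc])
      · exact Or.inr ⟨h, List.mem_cons.mpr (Or.inr hh), hr⟩

theorem pvFold_all_neg (u : List Char) :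
    ∀ (l : List (List Char)) (e0 : Int), (∀ h ∈ l, PySem.Chars.find u h = -1) →
      l.foldl
        (fun e h =>
          let pos := PySem.Chars.find u h
          if pos ≠ -1 ∧ pos < e then pos else e) e0 = e0 := by
  intro l
  induction l with
  | nil => intro e0 _; rfl
  | cons h0 t ih =>
    intro e0 hall
    simp only [List.foldl_cons]
    have h0eq := hall h0 List.mem_cons_self
    rw [if_neg (by simp [h0eq])]
    exact ih e0 (fun h hh => hall h (List.mem_cons.mpr (Or.inr hh)))

-- ===== VERDICT (by name: the statement is the Claim_ definition above) =====
theorem clean_structured_summary_spec : Claim_equal_clean_structured_summary := by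
  intro raw _
  unfold Spec_clean_structured_summary clean_structured_summary clean_structured_summary_alt
  set s := raw.toList with hs
  set u := PySem.Chars.upper s with hu
  have hulen : u.length = s.length := by rw [hu]; simp [PySem.Chars.upper]
  simp only []
  cases hscan : pvScan u 0 with
  | none =>
    -- no header occurs anywhere: every find is -1, the fold keeps len(s)
    have hnone := pvScan_none u 0 hscan
    have hall : ∀ h ∈ pvHeaders, PySem.Chars.find u h = -1 := by
      intro h hh
      rw [PySem.Chars.find_eq_neg_one_iff]
      intro hinf
      have : ∃ j, h <+: u.drop j :=
        (PySem.Chars.exists_prefix_drop_iff_isIn h u).mpr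
          ((PySem.Chars.isIn_iff_infix h u).mpr hinf)
      obtain ⟨j, hj⟩ := this
      have := (pvStartsWithAnyHeader_iff (u.drop j)).mpr ⟨h, hh, hj⟩
      rw [hnone j] at this; exact Bool.false_ne_true this
    rw [pvFold_all_neg u pvHeaders (s.length : Int) hall]
    simp
  | some j =>
    obtain ⟨-, hmatch, hmin⟩ := pvScan_some u 0 j hscan
    simp only [Nat.sub_zero] at hmatch hmin
    obtain ⟨h0, hh0, hpre⟩ := (pvStartsWithAnyHeader_iff (u.drop j)).mp hmatch
    -- j is a real position: the header is nonempty, so the suffix at j is nonempty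
    have hjlen : j < u.length := by
      by_contra hge
      rw [List.drop_eq_nil_of_le (by omega)] at hpre
      exact pvHeaders_ne_nil h0 hh0 (List.prefix_nil.mp hpre)
    -- find u h0 = j
    have hinf : h0 <:+: u :=
      (PySem.Chars.isIn_iff_infix h0 u).mp
        ((PySem.Chars.exists_prefix_drop_iff_isIn h0 u).mp ⟨j, hpre⟩)
    have hnn : 0 ≤ PySem.Chars.find u h0 := (PySem.Chars.find_nonneg_iff u h0).mpr hinf
    obtain ⟨hfp, hfmin⟩ := PySem.Chars.find_spec hnn
    have hle : (PySem.Chars.find u h0).toNat ≤ j := by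
      by_contra hlt
      exact hfmin j (by omega) hpre
    have hge : j ≤ (PySem.Chars.find u h0).toNat := by
      by_contra hlt
      have hm := (pvStartsWithAnyHeader_iff (u.drop (PySem.Chars.find u h0).toNat)).mpr
        ⟨h0, hh0, hfp⟩
      rw [hmin _ (by omega)] at hm; exact Bool.false_ne_true hm
    have hfind : PySem.Chars.find u h0 = (j : Int) := by omega
    -- the fold's result equals j
    obtain ⟨r1, r2, r3⟩ := pvFold_inv u pvHeaders (s.length : Int)
    set r := pvHeaders.foldl
        (fun e h =>
          let pos := PySem.Chars.find u h
          if pos ≠ -1 ∧ pos < e then pos else e) ((s.length : Int)) with hr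
    have hrle : r ≤ (j : Int) := by
      have := r2 h0 hh0 (by rw [hfind]; omega)
      omega
    have hrge : (j : Int) ≤ r := by
      rcases r3 with hre | ⟨h1, hh1, hre, hne1⟩
      · omega
      · have hnn1 : 0 ≤ PySem.Chars.find u h1 := by
          have := PySem.Chars.neg_one_le_find u h1; omega
        obtain ⟨hfp1, -⟩ := PySem.Chars.find_spec hnn1
        have hm := (pvStartsWithAnyHeader_iff (u.drop (PySem.Chars.find u h1).toNat)).mpr
          ⟨h1, hh1, hfp1⟩
        by_contra hlt
        rw [hmin (PySem.Chars.find u h1).toNat (by omega)] at hm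
        exact Bool.false_ne_true hm
    have hrj : r = (j : Int) := le_antisymm hrle hrge
    rw [hrj, if_pos (by exact_mod_cast (by omega : j < s.length)),
        PySem.List.slice_from s (by omega : (0:Int) ≤ (j : Int))]
    simp
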